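-- pv_equiv track=rewrite | github.com/Mutahir-15/PYTHON-PROJECTS | 04_assignment/Assignments 00 to 05/03_if_statements/01_print_events/app.py | print_events_with_if
-- ===== SOURCE A (Python) =====
-- def print_events_with_if(number_type):
--     numbers = []
--     count = 0
--     num = 0
--     target_remainder = 0 if number_type == "Even Numbers" else 1
--     while count < 20:
--         if num % 2 == target_remainder:
--             numbers.append(num)
--             count += 1
--         num += 1
--     return numbers
-- ===== SOURCE B (Python) =====
-- def print_events_with_if(number_type):
--     start = 0 if number_type == "Even Numbers" else 1
--     return list(range(start, start + 40, 2))
-- ===== Notes on version B (the rewrite author's own statement) =====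
-- stated objective: simpler
-- what changed: Replaces the counting while-loop that tests every integer with a direct closed-form range(start, start+40, 2) construction of the arithmetic progression.
import Mathlib
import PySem

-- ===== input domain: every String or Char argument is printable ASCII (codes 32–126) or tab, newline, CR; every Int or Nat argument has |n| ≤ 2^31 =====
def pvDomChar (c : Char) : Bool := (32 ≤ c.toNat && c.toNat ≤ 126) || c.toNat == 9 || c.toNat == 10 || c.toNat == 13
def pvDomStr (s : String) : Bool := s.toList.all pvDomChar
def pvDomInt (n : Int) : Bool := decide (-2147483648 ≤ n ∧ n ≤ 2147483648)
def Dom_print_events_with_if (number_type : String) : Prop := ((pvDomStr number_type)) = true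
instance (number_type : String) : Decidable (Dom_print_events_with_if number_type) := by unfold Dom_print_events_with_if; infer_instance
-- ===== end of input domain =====

-- B replaces the counting while-loop + modulo filter with a closed-form range(start, start+40, 2); objective: simpler.


-- ===== PORT A =====
-- A's while loop, transcribed as a fuel-guarded recursion (fuel 41 ≥ the 40
-- iterations the loop ever performs; the guard only makes the recursion total).
def pvLoopA (target : Int) : Nat → List Int → Int → Int → List Int
  | 0, numbers, _, _ => numbers
  | fuel+1, numbers, count, num =>
    if count < 20 then
      if PySem.Int.mod num 2 = target then
        pvLoopA target fuel (numbers ++ [num]) (count + 1) (num + 1)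
      else
        pvLoopA target fuel numbers count (num + 1)
    else numbers

def print_events_with_if (number_type : String) : List Int :=
  let target_remainder : Int := if number_type = "Even Numbers" then 0 else 1
  pvLoopA target_remainder 41 [] 0 0

-- ===== PORT B =====
def print_events_with_if_alt (number_type : String) : List Int :=
  let start : Int := if number_type = "Even Numbers" then 0 else 1
  PySem.List.pyRange start (start + 40) 2

-- ===== PRECONDITION & SPEC =====
def Spec_print_events_with_if (number_type : String) (out : List Int) : Prop := out = print_events_with_if_alt number_type
instance (number_type : String) (out : List Int) : Decidable (Spec_print_events_with_if number_type out) := by unfold Spec_print_events_with_if; infer_instance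

-- ===== CLAIM (what is proved, stated in full; the proofs are below) =====
def Claim_equal_print_events_with_if : Prop := ∀ (number_type : String), Dom_print_events_with_if number_type → Spec_print_events_with_if number_type (print_events_with_if number_type)

-- ===== LEMMAS AND PROOFS =====

-- ===== VERDICT (by name: the statement is the Claim_ definition above) =====
theorem print_events_with_if_spec : Claim_equal_print_events_with_if := by
  intro number_type _
  unfold Spec_print_events_with_if print_events_with_if print_events_with_if_alt
  by_cases h : number_type = "Even Numbers"
  · simp only [h]; decide
  · simp only [if_neg h]; decide
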